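-- pv_equiv track=rewrite | github.com/fair-contest/my_leetcode | src/0809/S0809_v3.py | isStretchy
-- ===== SOURCE A (Python) =====
-- def isStretchy(s: str, word: str) -> bool:
--     i, j = 0, 0
--     m, n = len(s), len(word)
--     while i < n and j < m:
--         cmp = s[j]
--         if word[i] != cmp:
--             return False
--         cnt1, cnt2 = 1, 1
--         while (i := i + 1) < n and word[i] == cmp:
--             cnt1 += 1
--         while (j := j + 1) < m and s[j] == cmp:
--             cnt2 += 1
--         if cnt2 < cnt1 or (cnt2 == 2 and cnt1 == 1):
--             return False
--     if i != n or j != m: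
--         return False
--     return True
-- ===== SOURCE B (Python) =====
-- def isStretchy(s: str, word: str) -> bool:
--     if not s or not word:
--         return not s and not word
--     c = s[0]
--     if word[0] != c:
--         return False
--     s2, w2 = s.lstrip(c), word.lstrip(c)
--     ns, nw = len(s) - len(s2), len(word) - len(w2)
--     if ns < nw or (ns == 2 and nw == 1):
--         return False
--     return isStretchy(s2, w2)
-- ===== Notes on version B (the rewrite author's own statement) =====
-- stated objective: simpler
-- what changed: B replaces A's iterative two-pointer scan with inline per-character counting loops by a short recursion that consumes one run per step via str.lstrip and recurses on the suffixes, with no indices or counters.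
import Mathlib
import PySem

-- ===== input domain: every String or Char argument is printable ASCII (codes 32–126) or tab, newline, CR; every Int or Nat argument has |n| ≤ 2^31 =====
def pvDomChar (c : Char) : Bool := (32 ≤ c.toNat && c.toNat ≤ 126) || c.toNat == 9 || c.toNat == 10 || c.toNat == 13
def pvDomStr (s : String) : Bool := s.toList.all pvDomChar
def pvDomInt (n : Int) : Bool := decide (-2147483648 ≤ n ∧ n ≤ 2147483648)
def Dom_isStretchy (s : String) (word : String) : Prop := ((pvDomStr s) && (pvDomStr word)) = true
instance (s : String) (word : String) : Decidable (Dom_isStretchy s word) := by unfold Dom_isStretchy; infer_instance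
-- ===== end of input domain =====

-- B replaces A's iterative two-pointer scan with counters by a short recursion that
-- consumes one run per step via lstrip on the suffixes (simpler; same cost; return value only).

-- ===== PORT A =====
-- A's inner while loops: count the run of `c` past the current index and return the rest.
def pvCountRun (c : Char) : List Char → Nat × List Char
  | [] => (0, [])
  | x :: xs => if x == c then let p := pvCountRun c xs; (p.1 + 1, p.2) else (0, x :: xs)

theorem pvCountRun_len_le (c : Char) (l : List Char) : (pvCountRun c l).2.length ≤ l.length := by
  induction l with
  | nil => simp [pvCountRun]
  | cons x xs ih =>
    simp only [pvCountRun]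
    split
    · exact le_trans ih (Nat.le_succ _)
    · exact le_refl _

-- A's outer while loop over the two index positions (suffixes of word and s).
def pvGoA : List Char → List Char → Bool
  | [], [] => true
  | [], _ :: _ => false        -- loop exits with j ≠ m
  | _ :: _, [] => false        -- loop exits with i ≠ n
  | wi :: wrest, cmp :: srest =>
    if wi != cmp then false
    else
      let p1 := pvCountRun cmp wrest   -- cnt1-1, rest of word
      let p2 := pvCountRun cmp srest   -- cnt2-1, rest of s
      let cnt1 := p1.1 + 1
      let cnt2 := p2.1 + 1
      if cnt2 < cnt1 || (cnt2 == 2 && cnt1 == 1) then false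
      else pvGoA p1.2 p2.2
termination_by w _ => w.length
decreasing_by
  exact Nat.lt_succ_of_le (pvCountRun_len_le _ _)

def isStretchy (s : String) (word : String) : Bool :=
  pvGoA word.toList s.toList

-- ===== PORT B =====
-- Source B's recursion; `s.lstrip(c)` is `List.dropWhile (· == c)` since c = s[0].
def pvGoB : List Char → List Char → Bool
  | [], [] => true
  | [], _ :: _ => false
  | _ :: _, [] => false
  | sc :: srest, wc :: wrest =>
    if wc != sc then false
    else
      let s2 := (sc :: srest).dropWhile (· == sc)
      let w2 := (wc :: wrest).dropWhile (· == sc)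
      let ns := (sc :: srest).length - s2.length
      let nw := (wc :: wrest).length - w2.length
      if ns < nw || (ns == 2 && nw == 1) then false
      else pvGoB s2 w2
termination_by s _ => s.length
decreasing_by
  simp only [List.dropWhile, BEq.rfl]
  exact Nat.lt_succ_of_le (List.length_dropWhile_le _ _)

def isStretchy_alt (s : String) (word : String) : Bool :=
  pvGoB s.toList word.toList

-- ===== PRECONDITION & SPEC =====
def Spec_isStretchy (s : String) (word : String) (out : Bool) : Prop := out = isStretchy_alt s word
instance (s : String) (word : String) (out : Bool) : Decidable (Spec_isStretchy s word out) := by unfold Spec_isStretchy; infer_instance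

-- ===== CLAIM (what is proved, stated in full; the proofs are below) =====
def Claim_equal_isStretchy : Prop := ∀ (s : String) (word : String), Dom_isStretchy s word → Spec_isStretchy s word (isStretchy s word)

-- ===== LEMMAS AND PROOFS =====

-- A's run counter equals B's lstrip-based length difference on the same tail.
theorem pvCountRun_eq (c : Char) (l : List Char) :
    pvCountRun c l = (l.length - (l.dropWhile (· == c)).length, l.dropWhile (· == c)) := by
  induction l with
  | nil => simp [pvCountRun]
  | cons x xs ih =>
    simp only [pvCountRun, List.dropWhile]
    by_cases h : (x == c) = true
    · have hle := List.length_dropWhile_le (· == c) xs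
      simp only [h, if_true, ih, List.length_cons]
      exact Prod.ext (by omega) rfl
    · simp [h]

theorem pvGoA_eq_goB : ∀ (n : Nat) (w s : List Char), w.length ≤ n →
    pvGoA w s = pvGoB s w := by
  intro n
  induction n with
  | zero =>
    intro w s hw
    match w, s with
    | [], [] => simp [pvGoA, pvGoB]
    | [], c :: cs => simp [pvGoA, pvGoB]
    | wi :: wrest, _ => simp at hw
  | succ n ih =>
    intro w s hw
    match w, s with
    | [], [] => simp [pvGoA, pvGoB]
    | [], c :: cs => simp [pvGoA, pvGoB]
    | wi :: wrest, [] => simp [pvGoA, pvGoB]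
    | wi :: wrest, cmp :: srest =>
      by_cases hc : wi = cmp
      · subst hc
        have hw' := List.length_dropWhile_le (· == wi) wrest
        have hs' := List.length_dropWhile_le (· == wi) srest
        simp only [pvGoA, pvGoB, pvCountRun_eq, bne_self_eq_false, Bool.false_eq_true,
          if_false, List.dropWhile, BEq.rfl, List.length_cons]
        have h1 : srest.length + 1 - (srest.dropWhile (· == wi)).length =
            srest.length - (srest.dropWhile (· == wi)).length + 1 := by omega
        have h2 : wrest.length + 1 - (wrest.dropWhile (· == wi)).length =
            wrest.length - (wrest.dropWhile (· == wi)).length + 1 := by omega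
        rw [h1, h2]
        split
        · rfl
        · exact ih _ _ (le_trans hw' (Nat.le_of_succ_le_succ hw))
      · have h1 : (wi != cmp) = true := by simp [bne, hc]
        have h2 : (cmp != wi) = true := by simp [bne, Ne.symm hc]
        simp [pvGoA, pvGoB, h1]

-- ===== VERDICT (by name: the statement is the Claim_ definition above) =====
theorem isStretchy_spec : Claim_equal_isStretchy := by
  intro s word _
  unfold Spec_isStretchy isStretchy isStretchy_alt
  exact pvGoA_eq_goB word.toList.length word.toList s.toList (le_refl _)
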